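-- pv_equiv track=rewrite | github.com/Flexlolo/aoc2020 | 14/sol.py | permute_masks
-- ===== SOURCE A (Python) =====
-- import itertools
--
-- def permute_masks(mask):
--     masks = []
--     bits = [i for i, v in enumerate(mask) if v == 'X']
--     perms = [''.join(seq) for seq in itertools.product('21', repeat=len(bits))]
--     new_mask = mask[:]
--     for perm in perms:
--         bit_vals = dict(zip(bits, perm))
--         for k in bit_vals:
--             new_mask = new_mask[:k] + bit_vals[k] + new_mask[k+1:]
--         masks.append(new_mask)
--     return masks
-- ===== SOURCE B (Python) =====
-- def permute_masks(mask):
--     # Recurse on the leftmost wildcard: substitute each replacement character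
--     # there and expand the remainder, keeping itertools.product's ordering.
--     i = mask.find('X')
--     if i == -1:
--         return [mask]
--     pre = mask[:i]
--     rest = permute_masks(mask[i + 1:])
--     return [pre + '2' + t for t in rest] + [pre + '1' + t for t in rest]
-- ===== Notes on version B (the rewrite author's own statement) =====
-- stated objective: simpler
-- what changed: Replaces index collection + itertools.product + per-permutation dict-driven slice substitution with a short recursion on the leftmost wildcard that expands both substitutions directly, so the non-wildcard text is never re-sliced once per wildcard per permutation.
import Mathlib
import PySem

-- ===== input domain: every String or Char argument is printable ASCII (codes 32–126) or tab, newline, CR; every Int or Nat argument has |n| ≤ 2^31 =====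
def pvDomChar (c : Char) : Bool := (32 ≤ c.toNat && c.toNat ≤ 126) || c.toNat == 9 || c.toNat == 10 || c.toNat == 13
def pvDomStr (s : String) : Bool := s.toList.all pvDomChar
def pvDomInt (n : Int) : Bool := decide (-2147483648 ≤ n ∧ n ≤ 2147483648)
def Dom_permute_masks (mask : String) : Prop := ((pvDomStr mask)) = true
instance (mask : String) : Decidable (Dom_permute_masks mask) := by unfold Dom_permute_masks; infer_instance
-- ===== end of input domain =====

-- B replaces index collection + itertools.product + per-permutation slice substitution
-- with a short recursion on the leftmost wildcard (objective: simpler).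

-- ===== PORT A =====
-- itertools.product('21', repeat=n): tuples in nested-loop order, first coordinate outermost
def pyProduct21 : Nat → List (List Char)
  | 0 => [[]]
  | n + 1 => ("21".toList).flatMap (fun c => (pyProduct21 n).map (c :: ·))

def permute_masks (mask : String) : List String :=
  let cs := mask.toList
  -- bits = [i for i, v in enumerate(mask) if v == 'X']
  let bits := (PySem.List.enumerate cs 0).filterMap (fun p => if p.2 = 'X' then some p.1 else none)
  -- perms = [''.join(seq) for seq in itertools.product('21', repeat=len(bits))]
  let perms := pyProduct21 bits.length
  -- new_mask = mask[:]; for perm in perms: bit_vals = dict(zip(bits, perm)); for k in bit_vals: …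
  -- ('for k in bit_vals: … bit_vals[k] …' iterates the dict's items; each key's lookup is its stored value)
  let st := perms.foldl (fun (st : List Char × List (List Char)) perm =>
      let bit_vals := PySem.Dict.ofList (bits.zip perm)
      let nm := bit_vals.items.foldl (fun nm (kv : Int × Char) =>
          PySem.List.slice nm none (some kv.1) ++ [kv.2] ++ PySem.List.slice nm (some (kv.1 + 1)) none) st.1
      (nm, st.2 ++ [nm])) (cs, [])
  st.2.map (fun l => String.ofList l)

-- ===== PORT B =====
-- recursive helper of B on the characters (strings as lists of chars):
-- i = mask.find('X'); if i == -1: return [mask]; else expand '2'/'1' at i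
def pmB (cs : List Char) : List (List Char) :=
  if PySem.Chars.find cs ['X'] = -1 then [cs]
  else
    let i := PySem.Chars.find cs ['X']
    let rest := pmB (PySem.List.slice cs (some (i + 1)) none)
    rest.map (fun t => PySem.List.slice cs none (some i) ++ '2' :: t) ++
    rest.map (fun t => PySem.List.slice cs none (some i) ++ '1' :: t)
termination_by cs.length
decreasing_by
  rename_i h
  have h0 : 0 ≤ PySem.Chars.find cs ['X'] := by
    have := PySem.Chars.neg_one_le_find cs ['X']
    omega
  have hne : cs ≠ [] := by
    intro hnil
    subst hnil
    have : (['X'] : List Char) <:+: ([] : List Char) :=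
      (PySem.Chars.find_nonneg_iff _ _).mp h0
    simp at this
  have hcast : PySem.Chars.find cs ['X'] + 1
      = (((PySem.Chars.find cs ['X']).toNat + 1 : Nat) : Int) := by omega
  rw [hcast, PySem.List.slice_from_natCast]
  have hpos : 0 < cs.length := List.length_pos_iff.mpr hne
  simp only [List.length_drop]
  omega

def permute_masks_alt (mask : String) : List String :=
  (pmB mask.toList).map (fun l => String.ofList l)

-- ===== PRECONDITION & SPEC =====
def Spec_permute_masks (mask : String) (out : List String) : Prop := out = permute_masks_alt mask
instance (mask : String) (out : List String) : Decidable (Spec_permute_masks mask out) := by unfold Spec_permute_masks; infer_instance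

-- ===== CLAIM (what is proved, stated in full; the proofs are below) =====
def Claim_equal_permute_masks : Prop := ∀ (mask : String), Dom_permute_masks mask → Spec_permute_masks mask (permute_masks mask)

-- ===== LEMMAS AND PROOFS =====

-- absolute indices (offset k) of the 'X' characters
def pvIdxs (k : Nat) : List Char → List Int
  | [] => []
  | c :: t => if c = 'X' then (k : Int) :: pvIdxs (k + 1) t else pvIdxs (k + 1) t

-- the mask with its 'X' positions replaced by the given permutation characters
def pvFill : List Char → List Char → List Char
  | [], _ => []
  | c :: t, ps =>
    if c = 'X' then
      match ps with
      | p :: ps' => p :: pvFill t ps'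
      | [] => []
    else c :: pvFill t ps

lemma pvBits_eq (cs : List Char) (k : Nat) :
    (PySem.List.enumerate cs (k : Int)).filterMap
      (fun p => if p.2 = 'X' then some p.1 else none) = pvIdxs k cs := by
  induction cs generalizing k with
  | nil => simp [PySem.List.enumerate_nil, pvIdxs]
  | cons c t ih =>
    rw [PySem.List.enumerate_cons, List.filterMap_cons]
    have h1 : (k : Int) + 1 = ((k + 1 : Nat) : Int) := by push_cast; ring
    rw [h1, ih (k + 1)]
    by_cases hc : c = 'X' <;> simp [pvIdxs, hc]

lemma pvIdxs_length (k : Nat) (cs : List Char) :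
    (pvIdxs k cs).length = cs.count 'X' := by
  induction cs generalizing k with
  | nil => simp [pvIdxs]
  | cons c t ih =>
    by_cases hc : c = 'X' <;> simp [pvIdxs, hc, ih]

lemma pvIdxs_ge (k : Nat) (cs : List Char) : ∀ m ∈ pvIdxs k cs, (k : Int) ≤ m := by
  induction cs generalizing k with
  | nil => simp [pvIdxs]
  | cons c t ih =>
    intro m hm
    by_cases hc : c = 'X'
    · rw [pvIdxs, if_pos hc] at hm
      rcases List.mem_cons.mp hm with rfl | hm'
      · omega
      · have := ih (k + 1) m hm'; push_cast at this ⊢; omega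
    · rw [pvIdxs, if_neg hc] at hm
      have := ih (k + 1) m hm; push_cast at this ⊢; omega

lemma pvIdxs_nodup (k : Nat) (cs : List Char) : (pvIdxs k cs).Nodup := by
  induction cs generalizing k with
  | nil => simp [pvIdxs]
  | cons c t ih =>
    by_cases hc : c = 'X' <;> simp [pvIdxs, hc]
    · refine ⟨fun hmem => ?_, ih (k + 1)⟩
      have := pvIdxs_ge (k + 1) t _ hmem
      push_cast at this; omega
    · exact ih (k + 1)

lemma pvProduct_length (n : Nat) : ∀ p ∈ pyProduct21 n, p.length = n := by
  induction n with
  | zero => simp [pyProduct21]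
  | succ n ih =>
    intro p hp
    simp only [pyProduct21, List.mem_flatMap, List.mem_map] at hp
    obtain ⟨c, _, q, hq, rfl⟩ := hp
    simp [ih q hq]

-- the items of dict(zip(bits, perm)) are exactly zip bits perm (bits are distinct)
lemma pvItems_eq (cs : List Char) (perm : List Char)
    (hlen : perm.length = cs.count 'X') :
    (PySem.Dict.ofList ((pvIdxs 0 cs).zip perm)).items = (pvIdxs 0 cs).zip perm := by
  have hnodup : (((pvIdxs 0 cs).zip perm).map Prod.fst).Nodup := by
    rw [List.map_fst_zip]
    · exact pvIdxs_nodup 0 cs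
    · rw [pvIdxs_length, hlen]
  have := PySem.Dict.items_foldl_insert_fresh ((pvIdxs 0 cs).zip perm)
    Prod.fst Prod.snd (PySem.Dict.empty)
    (fun a _ => PySem.Dict.contains_empty _) hnodup
  simpa [PySem.Dict.ofList, PySem.Dict.update] using this

-- the inner substitution loop rewrites exactly the 'X' positions
lemma pvInner_fold (cs : List Char) :
    ∀ (k : Nat) (pre nmT perm : List Char),
    pre.length = k →
    List.Forall₂ (fun a c => c = 'X' ∨ a = c) nmT cs →
    perm.length = cs.count 'X' →
    ((pvIdxs k cs).zip perm).foldl (fun nm (kv : Int × Char) =>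
        PySem.List.slice nm none (some kv.1) ++ [kv.2] ++
        PySem.List.slice nm (some (kv.1 + 1)) none) (pre ++ nmT)
      = pre ++ pvFill cs perm := by
  induction cs with
  | nil =>
    intro k pre nmT perm _ hf _
    cases hf
    simp [pvIdxs, pvFill]
  | cons c t ih =>
    intro k pre nmT perm hk hf hlen
    subst hk
    cases hf with
    | cons hac hf' =>
      rename_i a nmT'
      by_cases hc : c = 'X'
      · subst hc
        have : perm.length = t.count 'X' + 1 := by
          simpa [List.count_cons] using hlen
        cases perm with
        | nil => simp at this
        | cons p perm' =>
          rw [show pvIdxs pre.length ('X' :: t)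
                = (pre.length : Int) :: pvIdxs (pre.length + 1) t from by
            simp [pvIdxs]]
          simp only [List.zip_cons_cons, List.foldl_cons]
          have h1 : (pre.length : Int) + 1 = ((pre.length + 1 : Nat) : Int) := by
            push_cast; ring
          rw [h1, PySem.List.slice_to_natCast, PySem.List.slice_from_natCast,
              List.take_left]
          have hdrop : (pre ++ a :: nmT').drop (pre.length + 1) = nmT' := by
            have : pre ++ a :: nmT' = (pre ++ [a]) ++ nmT' := by simp
            rw [this, List.drop_left']
            simp
          rw [hdrop]
          have hre : pre ++ [p] ++ nmT' = (pre ++ [p]) ++ nmT' := by simp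
          rw [hre, ih (pre.length + 1) (pre ++ [p]) nmT' perm' (by simp) hf'
              (by simpa using this)]
          simp [pvFill]
      · have ha : a = c := by tauto
        subst ha
        simp only [pvIdxs, if_neg hc]
        have hre : pre ++ a :: nmT' = (pre ++ [a]) ++ nmT' := by simp
        rw [hre, ih (pre.length + 1) (pre ++ [a]) nmT' perm (by simp) hf'
            (by simpa [List.count_cons, hc] using hlen)]
        simp [pvFill, hc]

lemma pvFill_forall₂ (cs perm : List Char) (hlen : perm.length = cs.count 'X') :
    List.Forall₂ (fun a c => c = 'X' ∨ a = c) (pvFill cs perm) cs := by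
  induction cs generalizing perm with
  | nil => cases perm <;> simp [pvFill]
  | cons c t ih =>
    by_cases hc : c = 'X'
    · subst hc
      have : perm.length = t.count 'X' + 1 := by simpa [List.count_cons] using hlen
      cases perm with
      | nil => simp at this
      | cons p perm' =>
        simp only [pvFill]
        exact List.Forall₂.cons (Or.inl rfl) (ih perm' (by simpa using this))
    · simp only [pvFill, if_neg hc]
      exact List.Forall₂.cons (Or.inr rfl)
        (ih perm (by simpa [List.count_cons, hc] using hlen))

-- the outer loop over perms appends fill cs perm for each perm
lemma pvOuter_fold (cs : List Char) (perms : List (List Char)) :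
    ∀ (nm : List Char) (acc : List (List Char)),
    (∀ p ∈ perms, p.length = cs.count 'X') →
    List.Forall₂ (fun a c => c = 'X' ∨ a = c) nm cs →
    (perms.foldl (fun (st : List Char × List (List Char)) perm =>
        let bit_vals := PySem.Dict.ofList ((pvIdxs 0 cs).zip perm)
        let nm := bit_vals.items.foldl (fun nm (kv : Int × Char) =>
            PySem.List.slice nm none (some kv.1) ++ [kv.2] ++
            PySem.List.slice nm (some (kv.1 + 1)) none) st.1
        (nm, st.2 ++ [nm])) (nm, acc)).2
      = acc ++ perms.map (pvFill cs) := by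
  induction perms with
  | nil => intro nm acc _ _; simp
  | cons p ps ih =>
    intro nm acc hlen hf
    have hp : p.length = cs.count 'X' := hlen p (by simp)
    simp only [List.foldl_cons]
    rw [pvItems_eq cs p hp]
    have hstep : ((pvIdxs 0 cs).zip p).foldl (fun nm (kv : Int × Char) =>
        PySem.List.slice nm none (some kv.1) ++ [kv.2] ++
        PySem.List.slice nm (some (kv.1 + 1)) none) nm = pvFill cs p := by
      have := pvInner_fold cs 0 [] nm p rfl hf hp
      simpa using this
    rw [hstep, ih (pvFill cs p) (acc ++ [pvFill cs p])
        (fun q hq => hlen q (by simp [hq])) (pvFill_forall₂ cs p hp)]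
    simp

-- pvFill leaves wildcard-free text alone / distributes over a wildcard-free prefix
lemma pvFill_no_X (cs : List Char) (hX : 'X' ∉ cs) (perm : List Char) :
    pvFill cs perm = cs := by
  induction cs generalizing perm with
  | nil => simp [pvFill]
  | cons c t ih =>
    have hc : c ≠ 'X' := fun h => hX (h ▸ List.mem_cons_self)
    simp [pvFill, hc, ih (fun h => hX (List.mem_cons_of_mem _ h))]

lemma pvFill_append (pre cs : List Char) (hX : 'X' ∉ pre) (perm : List Char) :
    pvFill (pre ++ cs) perm = pre ++ pvFill cs perm := by
  induction pre generalizing perm with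
  | nil => simp
  | cons c t ih =>
    have hc : c ≠ 'X' := fun h => hX (h ▸ List.mem_cons_self)
    simp [pvFill, hc, ih (fun h => hX (List.mem_cons_of_mem _ h))]

-- decomposition of cs at the first 'X' (mask.find('X') = n ≥ 0)
lemma pvFind_decomp (cs : List Char) (h : ¬ PySem.Chars.find cs ['X'] = -1) :
    ∃ n : Nat, PySem.Chars.find cs ['X'] = (n : Int) ∧
      cs = cs.take n ++ 'X' :: cs.drop (n + 1) ∧ 'X' ∉ cs.take n := by
  have h0 : 0 ≤ PySem.Chars.find cs ['X'] := by
    have := PySem.Chars.neg_one_le_find cs ['X']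
    omega
  obtain ⟨hpre, hmin⟩ := PySem.Chars.find_spec h0
  refine ⟨(PySem.Chars.find cs ['X']).toNat, by omega, ?_, ?_⟩
  · obtain ⟨l, hl⟩ := hpre
    have hdl : l = cs.drop ((PySem.Chars.find cs ['X']).toNat + 1) := by
      have := congrArg (List.drop 1) hl
      simpa [List.drop_drop] using this
    conv_lhs => rw [← List.take_append_drop (PySem.Chars.find cs ['X']).toNat cs]
    congr 1
    rw [← hl, hdl]
    simp
  · intro hmem
    obtain ⟨j, hj, hjx⟩ := List.mem_iff_getElem.mp hmem
    have hjlt : j < (PySem.Chars.find cs ['X']).toNat := by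
      have h2 := hj
      simp at h2
      omega
    have hjcs : j < cs.length := by
      have h2 := hj; simp at h2; omega
    refine hmin j hjlt ⟨cs.drop (j + 1), ?_⟩
    have hdj : cs.drop j = cs[j] :: cs.drop (j + 1) :=
      List.drop_eq_getElem_cons hjcs
    have hx : cs[j] = 'X' := by
      simpa [List.getElem_take] using hjx
    rw [hdj, hx]
    simp

-- B's recursion computes the same map over the product
lemma pmB_eq (cs : List Char) :
    pmB cs = (pyProduct21 (cs.count 'X')).map (pvFill cs) := by
  generalize hL : cs.length = N
  induction N using Nat.strong_induction_on generalizing cs with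
  | _ N ih =>
    by_cases h : PySem.Chars.find cs ['X'] = -1
    · have hX : 'X' ∉ cs := by
        intro hmem
        obtain ⟨l₁, l₂, hdec⟩ := List.mem_iff_append.mp hmem
        exact (PySem.Chars.find_eq_neg_one_iff cs ['X']).mp h
          ⟨l₁, l₂, by rw [hdec]; simp⟩
      have hcount : cs.count 'X' = 0 := List.count_eq_zero.mpr hX
      rw [pmB.eq_def, if_pos h, hcount]
      simp [pyProduct21, pvFill_no_X cs hX]
    · obtain ⟨n, hn, hdec, hXpre⟩ := pvFind_decomp cs h
      have hi1 : PySem.Chars.find cs ['X'] + 1 = ((n + 1 : Nat) : Int) := by omega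
      have hto : PySem.List.slice cs none (some (PySem.Chars.find cs ['X']))
          = cs.take n := by
        rw [hn, PySem.List.slice_to_natCast]
      have hfrom : PySem.List.slice cs (some (PySem.Chars.find cs ['X'] + 1)) none
          = cs.drop (n + 1) := by
        rw [hi1, PySem.List.slice_from_natCast]
      have hsuflt : (cs.drop (n + 1)).length < N := by
        have := congrArg List.length hdec
        simp at this
        simp only [List.length_drop]
        omega
      rw [pmB.eq_def, if_neg h]
      simp only [hto, hfrom]
      rw [ih (cs.drop (n + 1)).length hsuflt (cs.drop (n + 1)) rfl]
      have hcount : cs.count 'X' = (cs.drop (n + 1)).count 'X' + 1 := by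
        conv_lhs => rw [hdec]
        simp [List.count_append, List.count_cons_self,
          List.count_eq_zero.mpr hXpre]
      rw [hcount,
        show pyProduct21 ((cs.drop (n + 1)).count 'X' + 1)
          = (pyProduct21 ((cs.drop (n + 1)).count 'X')).map ('2' :: ·)
            ++ (pyProduct21 ((cs.drop (n + 1)).count 'X')).map ('1' :: ·) from by
          simp [pyProduct21]]
      have hfill : ∀ c p, pvFill cs (c :: p)
          = cs.take n ++ c :: pvFill (cs.drop (n + 1)) p := by
        intro c p
        conv_lhs => rw [hdec]
        rw [pvFill_append _ _ hXpre]
        simp [pvFill]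
      simp [List.map_map, Function.comp_def, hfill]

-- ===== VERDICT (by name: the statement is the Claim_ definition above) =====
theorem permute_masks_spec : Claim_equal_permute_masks := by
  intro mask _
  unfold Spec_permute_masks permute_masks permute_masks_alt
  set cs := mask.toList with hcs
  rw [pmB_eq cs]
  have hbits : (PySem.List.enumerate cs 0).filterMap
      (fun p => if p.2 = 'X' then some p.1 else none) = pvIdxs 0 cs := by
    exact_mod_cast pvBits_eq cs 0
  simp only [hbits, pvIdxs_length]
  rw [pvOuter_fold cs (pyProduct21 (cs.count 'X')) cs []
      (pvProduct_length _) (List.forall₂_same.mpr (fun x _ => Or.inr rfl))]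
  simp
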